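-- pv_equiv track=rewrite | github.com/GrahamStrickland/epi | ch05/tests/test_dutch_national_flag2.py | is_partitioned
-- ===== SOURCE A (Python) =====
-- from typing import List
--
-- def is_partitioned(pivot: int, A: List[int]) -> bool:
--     lesser = True
--     greater = False
--     for i in A:
--         if lesser:
--             if i == pivot:
--                 lesser = False
--             elif i > pivot:
--                 return False
--         elif not lesser and not greater:
--             if i > pivot:
--                 greater = True
--             elif i < pivot:
--                 return False
--         else:
--             if i <= pivot or i == pivot:
--                 return False
--     return True
-- ===== SOURCE B (Python) =====
-- def is_partitioned(pivot, A):
--     less = [x for x in A if x < pivot]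
--     equal = [x for x in A if x == pivot]
--     greater = [x for x in A if x > pivot]
--     return A == less + equal + greater and not (greater and not equal)
-- ===== Notes on version B (the rewrite author's own statement) =====
-- stated objective: simpler
-- what changed: Replaces A's three-state flag machine with a declarative check: split A into <, ==, > buckets and test that A equals their concatenation, plus a guard reproducing the rule that a >pivot block is only accepted after an ==pivot element.
import Mathlib
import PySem

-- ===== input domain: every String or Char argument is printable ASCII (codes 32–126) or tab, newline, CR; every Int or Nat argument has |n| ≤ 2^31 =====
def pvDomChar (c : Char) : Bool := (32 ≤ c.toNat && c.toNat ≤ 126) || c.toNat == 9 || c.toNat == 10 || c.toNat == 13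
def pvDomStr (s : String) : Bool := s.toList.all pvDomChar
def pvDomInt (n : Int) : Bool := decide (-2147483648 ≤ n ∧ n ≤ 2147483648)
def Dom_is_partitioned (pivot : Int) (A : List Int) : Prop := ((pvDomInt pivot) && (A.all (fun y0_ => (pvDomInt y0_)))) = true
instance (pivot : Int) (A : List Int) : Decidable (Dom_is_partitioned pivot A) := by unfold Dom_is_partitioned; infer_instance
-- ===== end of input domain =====

-- B replaces A's three-state flag loop with a declarative bucket-and-concatenation check (simpler decomposition, same behaviour).

-- ===== PORT A =====
-- the loop of A, with the mutable flags `lesser`/`greater` as parameters; early `return False` = result false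
def isPartGo (pivot : Int) (lesser greater : Bool) : List Int → Bool
  | [] => true
  | i :: rest =>
    if lesser then
      if i == pivot then isPartGo pivot false greater rest
      else if i > pivot then false
      else isPartGo pivot lesser greater rest
    else if !lesser && !greater then
      if i > pivot then isPartGo pivot lesser true rest
      else if i < pivot then false
      else isPartGo pivot lesser greater rest
    else
      if i ≤ pivot || i == pivot then false
      else isPartGo pivot lesser greater rest

def is_partitioned (pivot : Int) (A : List Int) : Bool := isPartGo pivot true false A

-- ===== PORT B =====
def is_partitioned_alt (pivot : Int) (A : List Int) : Bool :=
  let less := A.filter (fun x => x < pivot)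
  let equal := A.filter (fun x => x == pivot)
  let greater := A.filter (fun x => x > pivot)
  decide (A = less ++ equal ++ greater) && !(!greater.isEmpty && equal.isEmpty)

-- ===== PRECONDITION & SPEC =====
def Spec_is_partitioned (pivot : Int) (A : List Int) (out : Bool) : Prop := out = is_partitioned_alt pivot A
instance (pivot : Int) (A : List Int) (out : Bool) : Decidable (Spec_is_partitioned pivot A out) := by unfold Spec_is_partitioned; infer_instance

-- ===== CLAIM (what is proved, stated in full; the proofs are below) =====
def Claim_equal_is_partitioned : Prop := ∀ (pivot : Int) (A : List Int), Dom_is_partitioned pivot A → Spec_is_partitioned pivot A (is_partitioned pivot A)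

-- ===== LEMMAS AND PROOFS =====

-- step equations for the machine
lemma go_less {pivot i : Int} (xs : List Int) (h : i < pivot) :
    isPartGo pivot true false (i :: xs) = isPartGo pivot true false xs := by
  have h1 : ¬ (i == pivot) = true := by simp; omega
  have h2 : ¬ i > pivot := by omega
  simp [isPartGo, h1, h2]
lemma go_gt0 {pivot i : Int} (xs : List Int) (h : pivot < i) :
    isPartGo pivot true false (i :: xs) = false := by
  have h1 : ¬ (i == pivot) = true := by simp; omega
  simp [isPartGo, h1, h]
lemma go_eq0 (pivot : Int) (xs : List Int) :
    isPartGo pivot true false (pivot :: xs) = isPartGo pivot false false xs := by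
  simp [isPartGo]
lemma go_gt1 {pivot i : Int} (xs : List Int) (h : pivot < i) :
    isPartGo pivot false false (i :: xs) = isPartGo pivot false true xs := by
  simp [isPartGo, h]
lemma go_lt1 {pivot i : Int} (xs : List Int) (h : i < pivot) :
    isPartGo pivot false false (i :: xs) = false := by
  have h1 : ¬ i > pivot := by omega
  simp [isPartGo, h, h1]
lemma go_eq1 (pivot : Int) (xs : List Int) :
    isPartGo pivot false false (pivot :: xs) = isPartGo pivot false false xs := by
  simp [isPartGo]
lemma go_le2 {pivot i : Int} (xs : List Int) (h : i ≤ pivot) :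
    isPartGo pivot false true (i :: xs) = false := by
  simp [isPartGo, h]
lemma go_gt2 {pivot i : Int} (xs : List Int) (h : pivot < i) :
    isPartGo pivot false true (i :: xs) = isPartGo pivot false true xs := by
  have h1 : ¬ i ≤ pivot := by omega
  have h2 : ¬ (i == pivot) = true := by simp; omega
  simp [isPartGo, h1, h2]

-- if a list equals (filter p l) ++ suffix and its head fails p, filter p l = []
lemma filter_nil_of_head {p : Int → Bool} {l t s : List Int} {i : Int}
    (hEq : i :: t = l.filter p ++ s) (hi : ¬ p i = true) : l.filter p = [] := by
  cases hf : l.filter p with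
  | nil => rfl
  | cons a u =>
    exfalso
    rw [hf] at hEq
    have ha : p a = true := by
      have : a ∈ l.filter p := by rw [hf]; exact List.mem_cons_self
      exact (List.mem_filter.mp this).2
    have : i = a := (List.cons.injEq _ _ _ _ ▸ hEq).1
    rw [this] at hi; exact hi ha

lemma isPartGo_greater (pivot : Int) (xs : List Int) :
    isPartGo pivot false true xs = decide (∀ x ∈ xs, pivot < x) := by
  induction xs with
  | nil => simp [isPartGo]
  | cons i xs ih =>
    by_cases h : i ≤ pivot
    · rw [go_le2 xs h]
      symm
      simp only [decide_eq_false_iff_not]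
      intro hall
      exact absurd (hall i List.mem_cons_self) (by omega)
    · rw [go_gt2 xs (by omega), ih]
      simp
      omega

lemma isPartGo_middle (pivot : Int) (xs : List Int) :
    isPartGo pivot false false xs
      = decide (xs = xs.filter (fun x => x == pivot) ++ xs.filter (fun x => pivot < x)) := by
  induction xs with
  | nil => simp [isPartGo]
  | cons i xs ih =>
    rcases lt_trichotomy i pivot with h | h | h
    · rw [go_lt1 xs h]
      have : ¬ (i :: xs = List.filter (fun x => x == pivot) (i :: xs) ++ List.filter (fun x => decide (pivot < x)) (i :: xs)) := by
        intro hEq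
        have : i ∈ List.filter (fun x => x == pivot) (i :: xs) ++ List.filter (fun x => decide (pivot < x)) (i :: xs) := by
          rw [← hEq]; exact List.mem_cons_self
        simp at this
        omega
      simp [this]
    · subst h
      rw [go_eq1, ih]
      simp
    · rw [go_gt1 xs h, isPartGo_greater]
      have hfe : List.filter (fun x => x == pivot) (i :: xs) = List.filter (fun x => x == pivot) xs := by
        simp [List.filter_cons]; omega
      have hfg : List.filter (fun x => decide (pivot < x)) (i :: xs) = i :: List.filter (fun x => decide (pivot < x)) xs := by
        simp [h]
      rw [hfe, hfg]
      simp only [decide_eq_decide]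
      constructor
      · intro hall
        have h1 : List.filter (fun x => x == pivot) xs = [] := by
          simp only [List.filter_eq_nil_iff]
          intro a ha
          have := hall a ha
          simp; omega
        have h2 : List.filter (fun x => decide (pivot < x)) xs = xs :=
          List.filter_eq_self.mpr (fun a ha => by simpa using hall a ha)
        simp [h1, h2]
      · intro hEq x hx
        have h1 : List.filter (fun x => x == pivot) xs = [] :=
          filter_nil_of_head hEq (by simp; omega)
        rw [h1, List.nil_append] at hEq
        have : x ∈ i :: List.filter (fun x => decide (pivot < x)) xs := by
          rw [← hEq]; exact List.mem_cons_of_mem _ hx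
        rcases List.mem_cons.mp this with h'' | h''
        · omega
        · simpa using (List.mem_filter.mp h'').2

lemma isPartGo_start (pivot : Int) (xs : List Int) :
    isPartGo pivot true false xs = is_partitioned_alt pivot xs := by
  induction xs with
  | nil => simp [isPartGo, is_partitioned_alt]
  | cons i xs ih =>
    rcases lt_trichotomy i pivot with h | h | h
    · rw [go_less xs h, ih]
      have h1 : List.filter (fun x => decide (x < pivot)) (i :: xs) = i :: List.filter (fun x => decide (x < pivot)) xs := by
        simp [h]
      have h2 : List.filter (fun x => x == pivot) (i :: xs) = List.filter (fun x => x == pivot) xs := by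
        simp [List.filter_cons]; omega
      have h3 : List.filter (fun x => decide (x > pivot)) (i :: xs) = List.filter (fun x => decide (x > pivot)) xs := by
        simp [List.filter_cons]; omega
      simp only [is_partitioned_alt, h1, h2, h3, List.cons_append, List.cons.injEq]
      simp
    · subst h
      rw [go_eq0, isPartGo_middle]
      have h1 : List.filter (fun x => decide (x < i)) (i :: xs) = List.filter (fun x => decide (x < i)) xs := by
        simp
      have h2 : List.filter (fun x => x == i) (i :: xs) = i :: List.filter (fun x => x == i) xs := by
        simp
      have h3 : List.filter (fun x => decide (x > i)) (i :: xs) = List.filter (fun x => decide (x > i)) xs := by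
        simp
      simp only [is_partitioned_alt, h1, h2, h3]
      have hguard : ((i :: List.filter (fun x => x == i) xs).isEmpty) = false := by simp
      simp only [hguard, Bool.and_false, Bool.not_false, Bool.and_true]
      simp only [decide_eq_decide]
      constructor
      · intro hEq
        have h4 : List.filter (fun x => decide (x < i)) xs = [] := by
          simp only [List.filter_eq_nil_iff]
          intro a ha hlt
          have : a ∈ List.filter (fun x => x == i) xs ++ List.filter (fun x => decide (i < x)) xs := by
            rw [← hEq]; exact ha
          simp at this
          simp at hlt
          omega
        rw [h4, List.nil_append, List.cons_append]
        exact congrArg (i :: ·) hEq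
      · intro hEq
        rw [List.append_assoc] at hEq
        have h4 : List.filter (fun x => decide (x < i)) xs = [] := by
          apply filter_nil_of_head hEq; simp
        rw [h4, List.nil_append, List.cons_append] at hEq
        have := (List.cons.injEq _ _ _ _ ▸ hEq).2
        simpa using this
    · rw [go_gt0 xs h]
      have hne : ¬ (i == pivot) = true := by simp; omega
      symm
      simp only [is_partitioned_alt, Bool.and_eq_false_iff]
      by_cases hg : (List.filter (fun x => x == pivot) (i :: xs)) = []
      · right
        simp [h, hg]
      · left
        simp only [decide_eq_false_iff_not]
        intro hEq
        rw [List.append_assoc] at hEq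
        have h1 : List.filter (fun x => decide (x < pivot)) (i :: xs) = [] := by
          apply filter_nil_of_head hEq; simp; omega
        rw [h1, List.nil_append] at hEq
        have h2 : List.filter (fun x => x == pivot) (i :: xs) = [] := by
          apply filter_nil_of_head hEq; simpa using hne
        exact hg h2

-- ===== VERDICT (by name: the statement is the Claim_ definition above) =====
theorem is_partitioned_spec : Claim_equal_is_partitioned := by
  intro pivot A _
  unfold Spec_is_partitioned is_partitioned
  exact isPartGo_start pivot A
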